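-- pv_equiv track=rewrite | github.com/rcalejan/assignment3.1 | filterContent.py | nGramTokenize
-- ===== SOURCE A (Python) =====
-- def nGramTokenize(single_tokens: list[str]) -> list[str]:
--     """Tokenizes bigrams and trigrams."""
--     n_grams = []
--     for i in range(len(single_tokens)-2):
--         bigram = single_tokens[i] + ' ' + single_tokens[i+1]
--         trigram = bigram + ' ' + single_tokens[i+2]
--         n_grams.append(bigram)
--         n_grams.append(trigram)
--     n_grams.append(single_tokens[len(single_tokens)-2] + ' ' + single_tokens[len(single_tokens)-1])
--     return n_grams
-- ===== SOURCE B (Python) =====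
-- def nGramTokenize(single_tokens: list[str]) -> list[str]:
--     """Tokenizes bigrams and trigrams.
--
--     Streaming one-pass decomposition: no indexing or lookahead; iterate over
--     the tokens carrying the previous token and the pending bigram, and each
--     incoming token flushes the pending bigram together with its completed
--     trigram; the final pending bigram is the trailing output line.
--     """
--     n_grams = []
--     prev = None
--     pending = None
--     for tok in single_tokens:
--         if pending is not None:
--             n_grams.append(pending)
--             n_grams.append(pending + ' ' + tok)
--         if prev is not None:
--             pending = prev + ' ' + tok
--         prev = tok
--     n_grams.append(pending)
--     return n_grams
-- ===== Notes on version B (the rewrite author's own statement) =====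
-- stated objective: alternative
-- what changed: Replaced A's index-based loop over range(len-2) that looks ahead two positions and its separate trailing indexed append with a streaming one-pass fold over the tokens themselves: it carries only the previous token and a pending bigram, each incoming token flushes the pending bigram plus its completed trigram, and the final pending bigram is the trailing line, so no indexing at all.
-- outside the precondition, e.g. on nGramTokenize([]): A raises IndexError, B returns [None]; on nGramTokenize(['x']): A returns ['x x'], B returns [None]
import Mathlib
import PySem

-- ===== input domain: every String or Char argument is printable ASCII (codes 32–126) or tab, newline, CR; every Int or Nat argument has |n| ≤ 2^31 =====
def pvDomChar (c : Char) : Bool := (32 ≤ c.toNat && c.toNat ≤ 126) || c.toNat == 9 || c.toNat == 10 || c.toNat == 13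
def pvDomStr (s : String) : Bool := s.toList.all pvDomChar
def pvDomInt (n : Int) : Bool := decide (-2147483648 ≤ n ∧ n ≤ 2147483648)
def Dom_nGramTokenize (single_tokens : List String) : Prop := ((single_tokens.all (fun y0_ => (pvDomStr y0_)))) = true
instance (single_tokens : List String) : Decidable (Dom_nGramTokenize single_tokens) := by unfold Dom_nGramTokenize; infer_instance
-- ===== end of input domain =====

-- B replaces A's indexed lookahead loop with an index-free streaming fold carrying the
-- previous token and a pending bigram (objective: alternative decomposition, same cost).


-- ===== PORT A =====
def nGramTokenize (single_tokens : List String) : List String :=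
  let n : Int := single_tokens.length
  let n_grams : List String :=
    (PySem.List.pyRange 0 (n - 2) 1).foldl (fun acc i =>
      let bigram := PySem.List.pyGetD single_tokens i "" ++ " " ++ PySem.List.pyGetD single_tokens (i + 1) ""
      let trigram := bigram ++ " " ++ PySem.List.pyGetD single_tokens (i + 2) ""
      acc ++ [bigram, trigram]) []
  n_grams ++ [PySem.List.pyGetD single_tokens (n - 2) "" ++ " " ++ PySem.List.pyGetD single_tokens (n - 1) ""]

-- ===== PORT B =====
-- state: (n_grams, prev, pending); the final `n_grams.append(pending)` appends Python's
-- None only outside Pre_ (length < 2), rendered here as Option.getD "".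
def nGramTokenize_alt (single_tokens : List String) : List String :=
  let st : List String × Option String × Option String :=
    single_tokens.foldl (fun s tok =>
      let out := match s.2.2 with
        | some p => s.1 ++ [p, p ++ " " ++ tok]
        | none => s.1
      let pending := match s.2.1 with
        | some prev => some (prev ++ " " ++ tok)
        | none => s.2.2
      (out, some tok, pending)) ([], none, none)
  st.1 ++ [st.2.2.getD ""]

-- ===== PRECONDITION & SPEC =====
-- Pre_ excludes the empty list, on which A raises IndexError, and the one-element list,
-- on which A's trailing append wraps around to a self-bigram by accidental negative
-- indexing while B's pending bigram is still None (no list[str] value to match).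
def Pre_nGramTokenize (single_tokens : List String) : Prop := 2 ≤ single_tokens.length
instance (single_tokens : List String) : Decidable (Pre_nGramTokenize single_tokens) := by unfold Pre_nGramTokenize; infer_instance
def pvWitness_nGramTokenize : List String := (["a", "b", "c"])
def Spec_nGramTokenize (single_tokens : List String) (out : List String) : Prop := out = nGramTokenize_alt single_tokens
instance (single_tokens : List String) (out : List String) : Decidable (Spec_nGramTokenize single_tokens out) := by unfold Spec_nGramTokenize; infer_instance

-- ===== CLAIM (what is proved, stated in full; the proofs are below) =====
def Claim_equal_nGramTokenize : Prop := ∀ (single_tokens : List String), Dom_nGramTokenize single_tokens → Pre_nGramTokenize single_tokens → Spec_nGramTokenize single_tokens (nGramTokenize single_tokens)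

-- ===== LEMMAS AND PROOFS =====

-- the common shape both ports reduce to: the bigram/trigram pairs along x :: y :: r …
def pairsFrom (x y : String) : List String → List String
  | [] => []
  | c :: r => (x ++ " " ++ y) :: (x ++ " " ++ y ++ " " ++ c) :: pairsFrom y c r

-- … and the bigram of the last two tokens of x :: y :: r
def lastBg (x y : String) : List String → String
  | [] => x ++ " " ++ y
  | c :: r => lastBg y c r

def lastTok (y : String) : List String → String
  | [] => y
  | c :: r => lastTok c r

-- A's indexed pair table is pairsFrom
lemma flatMap_range_eq_pairsFrom : ∀ (r : List String) (a b : String),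
    (List.range r.length).flatMap (fun k =>
      [(a :: b :: r).getD k "" ++ " " ++ (b :: r).getD k "",
       (a :: b :: r).getD k "" ++ " " ++ (b :: r).getD k "" ++ " " ++ r.getD k ""])
    = pairsFrom a b r := by
  intro r
  induction r with
  | nil => intro a b; simp [pairsFrom]
  | cons c r' ih =>
    intro a b
    rw [List.length_cons, List.range_succ_eq_map, List.flatMap_cons, List.flatMap_map]
    simp only [List.getD_cons_zero, List.getD_cons_succ]
    rw [pairsFrom, ← ih b c]
    simp

-- A's trailing indexed bigram is lastBg
lemma getD_last_two_eq_lastBg : ∀ (r : List String) (a b : String),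
    (a :: b :: r).getD ((a :: b :: r).length - 2) "" ++ " " ++ (a :: b :: r).getD ((a :: b :: r).length - 1) "" = lastBg a b r := by
  intro r
  induction r with
  | nil => intro a b; simp [lastBg]
  | cons c r' ih =>
    intro a b
    have h2 : (a :: b :: c :: r').length - 2 = ((b :: c :: r').length - 2) + 1 := by simp
    have h1 : (a :: b :: c :: r').length - 1 = ((b :: c :: r').length - 1) + 1 := by simp
    rw [h2, h1, List.getD_cons_succ, List.getD_cons_succ, lastBg]
    exact ih b c

-- B's fold invariant along x :: y :: r once the first two tokens are absorbed
lemma foldB_invariant : ∀ (r : List String) (x y : String) (out : List String),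
    r.foldl (fun (s : List String × Option String × Option String) tok =>
      (match s.2.2 with
        | some p => s.1 ++ [p, p ++ " " ++ tok]
        | none => s.1,
       some tok,
       match s.2.1 with
        | some prev => some (prev ++ " " ++ tok)
        | none => s.2.2)) (out, some y, some (x ++ " " ++ y))
    = (out ++ pairsFrom x y r, some (lastTok y r), some (lastBg x y r)) := by
  intro r
  induction r with
  | nil => intro x y out; simp [pairsFrom, lastBg, lastTok]
  | cons c r' ih =>
    intro x y out
    rw [List.foldl_cons]
    refine (ih y c (out ++ [x ++ " " ++ y, x ++ " " ++ y ++ " " ++ c])).trans ?_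
    simp [pairsFrom, lastBg, lastTok]

-- ===== VERDICT (by name: the statement is the Claim_ definition above) =====
theorem nGramTokenize_spec : Claim_equal_nGramTokenize := by
  intro ts _ hpre
  unfold Pre_nGramTokenize at hpre
  show nGramTokenize ts = nGramTokenize_alt ts
  match ts, hpre with
  | a :: b :: r, _ =>
    have hB : nGramTokenize_alt (a :: b :: r) = pairsFrom a b r ++ [lastBg a b r] := by
      unfold nGramTokenize_alt
      simp only [List.foldl_cons]
      rw [foldB_invariant r a b []]
      simp
    have hA : nGramTokenize (a :: b :: r) = pairsFrom a b r ++ [lastBg a b r] := by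
      unfold nGramTokenize
      simp only [PySem.List.foldl_append_eq_flatMap, List.nil_append]
      rw [PySem.List.pyRange_one]
      have hlen : ((((a :: b :: r).length : Int)) - 2 - 0).toNat = r.length := by
        simp; omega
      rw [hlen, List.flatMap_map]
      rw [← flatMap_range_eq_pairsFrom r a b, ← getD_last_two_eq_lastBg r a b]
      congr 1
      · apply List.flatMap_congr
        intro k hk
        simp only [List.mem_range] at hk
        rw [show ((0:Int) + (k:Int) + 1) = (((k + 1 : Nat)) : Int) by omega,
            show ((0:Int) + (k:Int) + 2) = (((k + 2 : Nat)) : Int) by omega,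
            show ((0:Int) + (k:Int)) = ((k : Nat) : Int) by omega,
            PySem.List.pyGetD_natCast, PySem.List.pyGetD_natCast, PySem.List.pyGetD_natCast]
        simp
      · have e2 : (((a :: b :: r).length : Int)) - 2 = ((r.length : Nat) : Int) := by
          simp; omega
        have e1 : (((a :: b :: r).length : Int)) - 1 = (((r.length + 1 : Nat)) : Int) := by
          simp
        rw [e2, e1, PySem.List.pyGetD_natCast, PySem.List.pyGetD_natCast]
        have f2 : (a :: b :: r).length - 2 = r.length := by simp
        have f1 : (a :: b :: r).length - 1 = r.length + 1 := by simp
        rw [f2, f1]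
    exact hA.trans hB.symm
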